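-- pv_equiv track=rewrite | github.com/pav3loff/Introduction-to-theory-of-computer-science-lab-assignments | utr_lab1.py | getNextStates
-- ===== SOURCE A (Python) =====
-- def getEpsilonTransitions(current_states, transitions):
--     new_states = set()
--     current_states = set(current_states)
--
--     while True:
--         new_states.clear()
--         for state in current_states:
--             for transition in transitions:
--                 if(state == transition[0] and str(transition[1]) == "$"):
--                     next_states = list(transition[2].split(","))
--                     for next_state in next_states:
--                         if(str(next_state) != "#"):
--                             new_states.add(next_state)
--
--         if(len(new_states) == 0 or new_states.issubset(current_states)):
--             break
--         current_states = current_states.union(new_states)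
--
--     return current_states
--
-- def getNextStates(current_states, symbol, transitions):
--     new_states = set()
--     old_current_states = set()
--     old_current_states = old_current_states.union(current_states)
--     current_states = list(current_states)
--
--     for state in current_states:
--         for transition in transitions:
--             if(state == transition[0] and symbol == transition[1]):
--                 next_states = list(transition[2].split(","))
--                 for next_state in next_states:
--                     if(str(next_state) != "#"):
--                         new_states.add(next_state)
--
--     for state in new_states:
--         current_states.append(state)
--
--     for state in old_current_states:
--         current_states.remove(state)
--
--     current_states = getEpsilonTransitions(current_states, transitions)
--
--     return current_states
-- ===== SOURCE B (Python) =====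
-- def getNextStates(current_states, symbol, transitions):
--     # index the transition table once: (source, symbol) -> target states ("," split, "#" dropped)
--     index = {}
--     for src, sym, dsts in transitions:
--         for d in dsts.split(","):
--             if d != "#":
--                 index.setdefault((src, sym), []).append(d)
--
--     # direct successors of the current states under `symbol`
--     closed = set()
--     closure = []
--     for s in current_states:
--         for nxt in index.get((s, symbol), []):
--             if nxt not in closed:
--                 closed.add(nxt)
--                 closure.append(nxt)
--
--     # epsilon closure via a FIFO worklist: each state expanded exactly once
--     i = 0
--     while i < len(closure):
--         for nxt in index.get((closure[i], "$"), []):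
--             if nxt not in closed:
--                 closed.add(nxt)
--                 closure.append(nxt)
--         i += 1
--
--     return set(closure)
-- ===== Notes on version B (the rewrite author's own statement) =====
-- stated objective: alternative
-- what changed: B builds a (state,symbol)->targets dict index of the transitions once and computes the epsilon closure with a FIFO worklist that expands each discovered state exactly once, instead of A's rescan of the whole transition list for every state and A's whole-set fixpoint rounds that recompute every state's successors on every round; Pre_ excludes current_states lists with duplicate entries (the argument denotes a set of NFA states), on which A's remove() leaves one accidental leftover copy per extra occurrence in its result.
-- outside the precondition, e.g. on getNextStates(['q0', 'q0'], 'a', [('q0', 'a', 'q1')]): A returns {'q0', 'q1'}, B returns {'q1'}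
import Mathlib
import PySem

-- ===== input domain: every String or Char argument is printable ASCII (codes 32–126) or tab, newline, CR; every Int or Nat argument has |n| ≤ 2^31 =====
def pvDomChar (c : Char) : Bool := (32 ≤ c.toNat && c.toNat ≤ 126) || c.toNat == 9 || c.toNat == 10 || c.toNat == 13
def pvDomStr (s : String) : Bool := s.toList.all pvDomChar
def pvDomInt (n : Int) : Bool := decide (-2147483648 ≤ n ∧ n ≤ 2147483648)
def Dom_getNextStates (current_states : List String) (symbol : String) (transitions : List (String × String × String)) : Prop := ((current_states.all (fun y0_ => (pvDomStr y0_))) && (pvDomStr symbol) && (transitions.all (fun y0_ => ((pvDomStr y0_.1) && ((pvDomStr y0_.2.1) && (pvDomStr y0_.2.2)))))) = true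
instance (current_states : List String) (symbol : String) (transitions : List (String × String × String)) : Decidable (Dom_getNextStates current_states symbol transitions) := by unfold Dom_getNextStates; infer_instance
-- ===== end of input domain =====

-- B indexes the transitions once by (state,symbol) and runs a FIFO-worklist epsilon closure,
-- replacing A's rescan of all transitions per state and its whole-set fixpoint rounds.

-- targets of all transitions (split on ",", "#" dropped): the finite universe the closure loops stay in
def pvTargets (transitions : List (String × String × String)) : List String :=
  transitions.flatMap (fun tr => ((PySem.Str.split? tr.2.2 ",").getD []).filter (· != "#"))

-- the list of successors of state `s` under `sym`, in transition order (characterises both ports' moves)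
def pvSuccL (transitions : List (String × String × String)) (s sym : String) : List String :=
  transitions.flatMap (fun tr =>
    if s = tr.1 ∧ sym = tr.2.1 then ((PySem.Str.split? tr.2.2 ",").getD []).filter (· != "#") else [])

-- ===== PORT A =====
-- A's inner double loop: add every non-"#" target of `state` under `symbol` to the set `ns`
def pvAddMove (transitions : List (String × String × String)) (symbol : String)
    (ns : PySem.Set String) (state : String) : PySem.Set String :=
  transitions.foldl (fun ns tr =>
    if state = tr.1 ∧ symbol = tr.2.1 then
      ((PySem.Str.split? tr.2.2 ",").getD []).foldl
        (fun ns nx => if nx != "#" then PySem.Set.add ns nx else ns) ns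
    else ns) ns

-- A's `new_states` loop over all current states
def pvNewA (transitions : List (String × String × String)) (symbol : String)
    (cur : List String) : PySem.Set String :=
  cur.foldl (pvAddMove transitions symbol) PySem.Set.empty

lemma pv_foldl_add_filter (l : List String) (ns : PySem.Set String) :
    l.foldl (fun ns nx => if nx != "#" then PySem.Set.add ns nx else ns) ns
      = PySem.Set.update ns (l.filter (· != "#")) := by
  induction l generalizing ns with
  | nil => simp [PySem.Set.update]
  | cons x l ih =>
    rw [List.foldl_cons, List.filter_cons]
    by_cases h : x = "#"
    · simpa [h] using ih ns
    · simpa [h, PySem.Set.update_cons] using ih (PySem.Set.add ns x)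

lemma pv_addMove_eq (ts : List (String × String × String)) (sym : String)
    (ns : PySem.Set String) (s : String) :
    pvAddMove ts sym ns s = PySem.Set.update ns (pvSuccL ts s sym) := by
  induction ts generalizing ns with
  | nil => rfl
  | cons tr ts ih =>
    by_cases h : s = tr.1 ∧ sym = tr.2.1
    · have h1 : pvAddMove (tr :: ts) sym ns s
          = pvAddMove ts sym
            (PySem.Set.update ns (((PySem.Str.split? tr.2.2 ",").getD []).filter (· != "#"))) s := by
        rw [pvAddMove, List.foldl_cons, if_pos h, pv_foldl_add_filter]
        rfl
      rw [h1, ih]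
      simp only [pvSuccL]
      rw [List.flatMap_cons, if_pos h, PySem.Set.update_append]
    · have h1 : pvAddMove (tr :: ts) sym ns s = pvAddMove ts sym ns s := by
        rw [pvAddMove, List.foldl_cons, if_neg h]
        rfl
      rw [h1, ih]
      simp only [pvSuccL]
      rw [List.flatMap_cons, if_neg h, List.nil_append]

lemma pv_foldl_update_eq (f : String → List String) (cur : List String) (acc : PySem.Set String) :
    cur.foldl (fun a s => PySem.Set.update a (f s)) acc
      = PySem.Set.update acc (cur.flatMap f) := by
  induction cur generalizing acc with
  | nil => simp [PySem.Set.update]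
  | cons x l ih => simp [List.flatMap_cons, PySem.Set.update_append, ih]

lemma pv_newA_eq (ts : List (String × String × String)) (sym : String) (cur : List String) :
    pvNewA ts sym cur = PySem.Set.ofList (cur.flatMap (fun s => pvSuccL ts s sym)) := by
  have hf : pvAddMove ts sym = fun a s => PySem.Set.update a (pvSuccL ts s sym) :=
    funext fun a => funext fun s => pv_addMove_eq ts sym a s
  rw [pvNewA, hf, pv_foldl_update_eq]
  rfl

lemma pv_succL_subset_targets (ts : List (String × String × String)) (s sym x : String)
    (hx : x ∈ pvSuccL ts s sym) : x ∈ pvTargets ts := by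
  rw [pvSuccL, List.mem_flatMap] at hx
  rcases hx with ⟨tr, htr, hxm⟩
  rw [pvTargets, List.mem_flatMap]
  refine ⟨tr, htr, ?_⟩
  by_cases h : s = tr.1 ∧ sym = tr.2.1
  · rwa [if_pos h] at hxm
  · rw [if_neg h] at hxm; cases hxm

lemma pv_filter_notmem_lt (T s s' : List String)
    (hmono : ∀ y, y ∈ s → y ∈ s') (x : String) (hxT : x ∈ T) (hxs : x ∉ s) (hxs' : x ∈ s') :
    (T.filter (fun t => !decide (t ∈ s'))).length < (T.filter (fun t => !decide (t ∈ s))).length := by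
  obtain ⟨l₁, l₂, rfl⟩ := List.append_of_mem hxT
  rw [List.filter_append, List.filter_append, List.filter_cons, List.filter_cons]
  simp only [hxs, hxs', decide_true, decide_false, Bool.not_true, Bool.not_false,
    if_true, if_false, Bool.false_eq_true]
  have h1 : (l₁.filter (fun t => !decide (t ∈ s'))).length
      ≤ (l₁.filter (fun t => !decide (t ∈ s))).length := by
    rw [← List.countP_eq_length_filter, ← List.countP_eq_length_filter]
    apply List.countP_mono_left
    intro a _ ha
    simp only [Bool.not_eq_true', decide_eq_false_iff_not] at *
    exact fun h => ha (hmono a h)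
  have h2 : (l₂.filter (fun t => !decide (t ∈ s'))).length
      ≤ (l₂.filter (fun t => !decide (t ∈ s))).length := by
    rw [← List.countP_eq_length_filter, ← List.countP_eq_length_filter]
    apply List.countP_mono_left
    intro a _ ha
    simp only [Bool.not_eq_true', decide_eq_false_iff_not] at *
    exact fun h => ha (hmono a h)
  simp only [List.length_append, List.length_cons]
  omega

lemma pv_update_growth (T l : List String) (s : PySem.Set String) (hl : ∀ x ∈ l, x ∈ T) :
    (PySem.Set.update s l).length + (T.filter (fun t => !decide (t ∈ PySem.Set.update s l))).length
      ≤ s.length + (T.filter (fun t => !decide (t ∈ s))).length := by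
  induction l generalizing s with
  | nil => exact Nat.le_of_eq rfl
  | cons x t ih =>
    rw [PySem.Set.update_cons]
    refine le_trans (ih (PySem.Set.add s x) (fun y hy => hl y (by simp [hy]))) ?_
    by_cases hx : x ∈ s
    · rw [PySem.Set.add_of_mem hx]
    · rw [PySem.Set.add_of_not_mem hx]
      have hlt := pv_filter_notmem_lt T s (s ++ [x]) (fun y hy => by simp [hy])
        x (hl x (by simp)) hx (by simp)
      simp only [List.length_append, List.length_cons, List.length_nil]
      omega

lemma pv_le_length_update (l : List String) (s : PySem.Set String) :
    s.length ≤ (PySem.Set.update s l).length := by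
  induction l generalizing s with
  | nil => simp [PySem.Set.update]
  | cons x t ih =>
    rw [PySem.Set.update_cons]
    refine le_trans ?_ (ih (PySem.Set.add s x))
    rw [PySem.Set.add_eq_ite]
    split <;> simp

-- A's `while True` fixpoint loop in getEpsilonTransitions
def pvEpsLoop (transitions : List (String × String × String)) (cur : PySem.Set String) :
    PySem.Set String :=
  let ns := pvNewA transitions "$" cur
  if PySem.Set.len ns = 0 ∨ PySem.Set.issubset ns cur = true then cur
  else pvEpsLoop transitions (PySem.Set.union cur ns)
termination_by ((pvTargets transitions).filter (fun t => !decide (t ∈ cur))).length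
decreasing_by
  rename_i h
  obtain ⟨_h0, hsub⟩ := not_or.1 h
  have hx : ∃ x ∈ pvNewA transitions "$" cur, x ∉ cur := by
    by_contra hall
    push_neg at hall
    exact hsub ((PySem.Set.issubset_iff _ _).2 hall)
  obtain ⟨x, hxns, hxcur⟩ := hx
  have hxt : x ∈ pvTargets transitions := by
    rw [pv_newA_eq] at hxns
    have hm := (PySem.Set.mem_ofList _ _).1 hxns
    rw [List.mem_flatMap] at hm
    obtain ⟨s, _, hxs⟩ := hm
    exact pv_succL_subset_targets transitions s "$" x hxs
  exact pv_filter_notmem_lt _ cur (PySem.Set.union cur (pvNewA transitions "$" cur))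
    (fun y hy => (PySem.Set.mem_union _ _ y).2 (Or.inl hy)) x hxt hxcur
    ((PySem.Set.mem_union _ _ x).2 (Or.inr hxns))

def getEpsilonTransitions (current_states : List String)
    (transitions : List (String × String × String)) : List String :=
  pvEpsLoop transitions (PySem.Set.ofList current_states)

def getNextStates (current_states : List String) (symbol : String)
    (transitions : List (String × String × String)) : List String :=
  let new_states := pvNewA transitions symbol current_states
  let old_current_states := PySem.Set.union PySem.Set.empty current_states
  let cs1 := current_states ++ new_states
  -- list.remove never raises here: every member of old_current_states occurs in cs1
  let cs2 := old_current_states.foldl (fun l s => (PySem.List.remove? l s).getD l) cs1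
  getEpsilonTransitions cs2 transitions

-- ===== PORT B =====
-- the transition index: (source, symbol) ↦ its targets, "," split and "#" dropped, built in one pass
def pvIndex (transitions : List (String × String × String)) :
    PySem.Dict (String × String) (List String) :=
  transitions.foldl (fun d tr =>
    ((PySem.Str.split? tr.2.2 ",").getD []).foldl
      (fun d t => if t != "#" then d.modify (tr.1, tr.2.1) [] (· ++ [t]) else d) d)
    PySem.Dict.empty

def pvLook (transitions : List (String × String × String)) (key : String × String) : List String :=
  (pvIndex transitions).getD key []

def pvPairs (ts : List (String × String × String)) : List ((String × String) × String) :=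
  ts.flatMap (fun tr =>
    (((PySem.Str.split? tr.2.2 ",").getD []).filter (· != "#")).map (fun t => ((tr.1, tr.2.1), t)))

lemma pv_fold_if_filter {D : Type} (l : List String) (g : D → String → D) (d : D) :
    l.foldl (fun d t => if t != "#" then g d t else d) d = (l.filter (· != "#")).foldl g d := by
  induction l generalizing d with
  | nil => rfl
  | cons x t ih =>
    rw [List.foldl_cons, List.filter_cons]
    by_cases h : x = "#"
    · subst h
      simp only [bne_self_eq_false, Bool.false_eq_true, if_false]
      exact ih d
    · have hb : (x != "#") = true := by simpa using h
      rw [hb]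
      simp only [if_true]
      rw [List.foldl_cons]
      exact ih (g d x)

lemma pv_index_eq_pairs_fold (ts : List (String × String × String)) :
    pvIndex ts
      = (pvPairs ts).foldl (fun d p => d.modify p.1 [] (· ++ [p.2])) PySem.Dict.empty := by
  rw [pvIndex, pvPairs, List.foldl_flatMap]
  congr 1
  funext d tr
  rw [List.foldl_map, pv_fold_if_filter]

lemma pv_look_eq (ts : List (String × String × String)) (s sym : String) :
    pvLook ts (s, sym) = pvSuccL ts s sym := by
  rw [pvLook, pv_index_eq_pairs_fold, PySem.Dict.getD_foldl_modify_append, pvPairs,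
    List.filter_flatMap, List.map_flatMap, pvSuccL]
  rw [PySem.Dict.getD_empty, List.nil_append]
  congr 1
  funext tr
  rw [List.filter_map, List.map_map]
  by_cases h : s = tr.1 ∧ sym = tr.2.1
  · rw [if_pos h]
    obtain ⟨h1, h2⟩ := h
    have hp : ((fun (p : (String × String) × String) => p.1 == (s, sym)) ∘ fun t => ((tr.1, tr.2.1), t)) = fun _ => true := by
      funext t
      simp [h1, h2]
    rw [hp, List.filter_true]
    simp
  · rw [if_neg h]
    have hp : ((fun (p : (String × String) × String) => p.1 == (s, sym)) ∘ fun t => ((tr.1, tr.2.1), t)) = fun _ => false := by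
      funext t
      simp only [Function.comp_apply]
      rw [beq_eq_false_iff_ne]
      rintro hq
      obtain ⟨ha, hb⟩ := Prod.mk.injEq .. ▸ hq
      exact h ⟨ha.symm, hb.symm⟩
    rw [hp, List.filter_false]
    rfl

-- B's FIFO worklist: `closure` with read pointer i (`closed` is the same set: closure is insertion-ordered)
def pvBfs (transitions : List (String × String × String)) (res : PySem.Set String) (i : Nat) :
    PySem.Set String :=
  if h : i < res.length then
    pvBfs transitions (PySem.Set.update res (pvLook transitions (res[i], "$"))) (i + 1)
  else res
termination_by (res.length - i) + ((pvTargets transitions).filter (fun t => !decide (t ∈ res))).length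
decreasing_by
  have hsubT : ∀ x ∈ pvLook transitions (res[i], "$"), x ∈ pvTargets transitions := by
    rw [pv_look_eq]
    exact fun x hx => pv_succL_subset_targets _ _ _ x hx
  have hg := pv_update_growth (pvTargets transitions) _ res hsubT
  have hle := pv_le_length_update (pvLook transitions (res[i], "$")) res
  omega

def getNextStates_alt (current_states : List String) (symbol : String)
    (transitions : List (String × String × String)) : List String :=
  let seed := current_states.foldl
    (fun acc s => PySem.Set.update acc (pvLook transitions (s, symbol))) PySem.Set.empty
  pvBfs transitions seed 0

-- ===== PRECONDITION & SPEC =====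
-- Pre_ excludes current_states lists with duplicate entries: the argument denotes a SET of NFA
-- states, and on duplicates A's remove() deletes only one occurrence per state, so one accidental
-- leftover copy per extra occurrence stays in A's result.
def Pre_getNextStates (current_states : List String) (symbol : String) (transitions : List (String × String × String)) : Prop :=
  current_states.Nodup
instance (current_states : List String) (symbol : String) (transitions : List (String × String × String)) : Decidable (Pre_getNextStates current_states symbol transitions) := by unfold Pre_getNextStates; infer_instance

def pvWitness_getNextStates : List String × String × (List (String × String × String)) :=
  (["q0", "q1"], "a", [("q0", "a", "q1,q2"), ("q2", "$", "q3"), ("q1", "a", "#")])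

def Spec_getNextStates (current_states : List String) (symbol : String) (transitions : List (String × String × String)) (out : List String) : Prop := out = getNextStates_alt current_states symbol transitions
instance (current_states : List String) (symbol : String) (transitions : List (String × String × String)) (out : List String) : Decidable (Spec_getNextStates current_states symbol transitions out) := by unfold Spec_getNextStates; infer_instance

-- ===== CLAIM (what is proved, stated in full; the proofs are below) =====
def Claim_equal_getNextStates : Prop := ∀ (current_states : List String) (symbol : String) (transitions : List (String × String × String)), Dom_getNextStates current_states symbol transitions → Pre_getNextStates current_states symbol transitions → Spec_getNextStates current_states symbol transitions (getNextStates current_states symbol transitions)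

-- ===== LEMMAS AND PROOFS =====

lemma pv_foldl_erase_nodup (ds : List String) (m : List String)
    (hnd : ds.Nodup) : ds.foldl List.erase (ds ++ m) = m := by
  induction ds with
  | nil => rfl
  | cons d ds ih =>
    rw [List.foldl_cons, List.cons_append, List.erase_cons_head]
    exact ih (List.nodup_cons.1 hnd).2

lemma pv_remove_fold (ds l m : List String) (hnd : ds.Nodup) (hsub : ∀ v ∈ ds, v ∈ l) :
    ds.foldl (fun l' s => (PySem.List.remove? l' s).getD l') (l ++ m)
      = ds.foldl List.erase l ++ m := by
  induction ds generalizing l with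
  | nil => rfl
  | cons d ds ih =>
    rw [List.foldl_cons, List.foldl_cons]
    have hd : d ∈ l := hsub d (by simp)
    rw [PySem.List.remove?_eq_some_erase _ _ (by simp [hd] : d ∈ l ++ m), Option.getD_some,
      List.erase_append_left _ hd]
    refine ih (l.erase d) (List.nodup_cons.1 hnd).2 (fun v hv => ?_)
    have hne : v ≠ d := fun hvd => (List.nodup_cons.1 hnd).1 (hvd ▸ hv)
    exact (List.mem_erase_of_ne hne).2 (hsub v (by simp [hv]))

lemma pv_update_subset_eq (s : PySem.Set String) (l : List String) (h : ∀ x ∈ l, x ∈ s) :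
    PySem.Set.update s l = s := by
  induction l generalizing s with
  | nil => rfl
  | cons x l ih =>
    have hx : x ∈ s := h x (by simp)
    rw [PySem.Set.update_cons, PySem.Set.add_of_mem hx]
    exact ih s (fun y hy => h y (by simp [hy]))

lemma pv_update_ofList (s : PySem.Set String) (l : List String) :
    PySem.Set.update s (PySem.Set.ofList l) = PySem.Set.update s l := by
  induction l using List.reverseRecOn generalizing s with
  | nil => rfl
  | append_singleton l x ih =>
    rw [PySem.Set.ofList_append_singleton, PySem.Set.update_append]
    by_cases hx : x ∈ PySem.Set.ofList l
    · have hxl : x ∈ l := (PySem.Set.mem_ofList l x).1 hx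
      have hm : x ∈ PySem.Set.update s l := (PySem.Set.mem_update s l x).2 (Or.inr hxl)
      rw [PySem.Set.add_of_mem hx, ih, PySem.Set.update_cons (s.update l) x [],
        PySem.Set.add_of_mem hm]
      rfl
    · rw [PySem.Set.add_of_not_mem hx, PySem.Set.update_append, ih,
        PySem.Set.update_cons (s.update l) x []]

lemma pv_stop_iff (l : List String) (cur : PySem.Set String) :
    (PySem.Set.len (PySem.Set.ofList l) = 0 ∨ PySem.Set.issubset (PySem.Set.ofList l) cur = true)
      ↔ ∀ x ∈ l, x ∈ cur := by
  constructor
  · rintro (h | h) x hx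
    · have hnil : PySem.Set.ofList l = [] := by
        simp only [PySem.Set.len] at h
        exact List.length_eq_zero_iff.1 (by exact_mod_cast h)
      have hm := (PySem.Set.mem_ofList l x).2 hx
      rw [hnil] at hm
      cases hm
    · exact (PySem.Set.issubset_iff _ _).1 h x ((PySem.Set.mem_ofList l x).2 hx)
  · intro h
    right
    rw [PySem.Set.issubset_iff]
    intro x hx
    exact h x ((PySem.Set.mem_ofList l x).1 hx)

-- one unfolding of A's fixpoint loop, in update form
lemma pv_eps_step (ts : List (String × String × String)) (cur : PySem.Set String) :
    pvEpsLoop ts cur =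
      if ∀ x ∈ cur.flatMap (fun s => pvSuccL ts s "$"), x ∈ cur then cur
      else pvEpsLoop ts (PySem.Set.update cur (cur.flatMap (fun s => pvSuccL ts s "$"))) := by
  rw [pvEpsLoop]
  by_cases hstop : ∀ x ∈ cur.flatMap (fun s => pvSuccL ts s "$"), x ∈ cur
  · rw [if_pos hstop, if_pos]
    rw [pv_newA_eq]
    exact (pv_stop_iff _ _).2 hstop
  · rw [if_neg hstop, if_neg]
    · have he : PySem.Set.union cur (pvNewA ts "$" cur)
          = PySem.Set.update cur (cur.flatMap (fun s => pvSuccL ts s "$")) := by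
        rw [pv_newA_eq]
        exact pv_update_ofList cur _
      rw [he]
    · rw [pv_newA_eq]
      exact fun hc => hstop ((pv_stop_iff _ _).1 hc)

-- absorbing the one-step successors of a middle segment does not change A's fixpoint loop
lemma pv_eps_absorb (ts : List (String × String × String)) :
    ∀ (N : Nat) (P E R : List String),
      ((pvTargets ts).filter (fun t => !decide (t ∈ P ++ E ++ R))).length ≤ N →
      (P ++ E ++ R).Nodup →
      (∀ s ∈ P, ∀ x ∈ pvSuccL ts s "$", x ∈ P ++ E ++ R) →
      pvEpsLoop ts (PySem.Set.update (P ++ E ++ R) (E.flatMap (fun s => pvSuccL ts s "$")))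
        = pvEpsLoop ts (P ++ E ++ R) := by
  intro N
  induction N using Nat.strong_induction_on with
  | _ N ih =>
    intro P E R hN hnd hP
    have hmemE : ∀ s ∈ E, s ∈ P ++ E ++ R := by
      intro s hs
      simp [hs]
    have hmemR : ∀ s ∈ R, s ∈ P ++ E ++ R := by
      intro s hs
      simp [hs]
    by_cases hstop : ∀ x ∈ (P ++ E ++ R).flatMap (fun s => pvSuccL ts s "$"), x ∈ P ++ E ++ R
    · -- the loop is already at a fixpoint: the added successors are all present
      have hEsub : ∀ x ∈ E.flatMap (fun s => pvSuccL ts s "$"), x ∈ P ++ E ++ R := by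
        intro x hx
        rw [List.mem_flatMap] at hx
        obtain ⟨s, hs, hxs⟩ := hx
        exact hstop x (List.mem_flatMap.2 ⟨s, hmemE s hs, hxs⟩)
      rw [pv_update_subset_eq _ _ hEsub]
    · -- one round on each side, then the inductive hypothesis
      have hCeq : pvEpsLoop ts (P ++ E ++ R)
          = pvEpsLoop ts (PySem.Set.update (P ++ E ++ R)
              ((P ++ E ++ R).flatMap (fun s => pvSuccL ts s "$"))) := by
        rw [pv_eps_step ts (P ++ E ++ R), if_neg hstop]
      have hflatC : (P ++ E ++ R).flatMap (fun s => pvSuccL ts s "$")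
          = (P.flatMap (fun s => pvSuccL ts s "$") ++ E.flatMap (fun s => pvSuccL ts s "$"))
            ++ R.flatMap (fun s => pvSuccL ts s "$") := by
        rw [List.flatMap_append, List.flatMap_append]
      have hPsub : ∀ x ∈ P.flatMap (fun s => pvSuccL ts s "$"), x ∈ P ++ E ++ R := by
        intro x hx
        rw [List.mem_flatMap] at hx
        obtain ⟨s, hs, hxs⟩ := hx
        exact hP s hs x hxs
      -- C2 both as update C (flat C) and as update C' (flat R)
      have hC2 : PySem.Set.update (P ++ E ++ R) ((P ++ E ++ R).flatMap (fun s => pvSuccL ts s "$"))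
          = PySem.Set.update (PySem.Set.update (P ++ E ++ R) (E.flatMap (fun s => pvSuccL ts s "$")))
              (R.flatMap (fun s => pvSuccL ts s "$")) := by
        rw [hflatC, PySem.Set.update_append, PySem.Set.update_append,
          pv_update_subset_eq _ _ hPsub]
      have hC'mem : ∀ x ∈ P ++ E ++ R,
          x ∈ PySem.Set.update (P ++ E ++ R) (E.flatMap (fun s => pvSuccL ts s "$")) := by
        intro x hx
        exact (PySem.Set.mem_update _ _ x).2 (Or.inl hx)
      have hEin : ∀ x ∈ E.flatMap (fun s => pvSuccL ts s "$"),
          x ∈ PySem.Set.update (P ++ E ++ R) (E.flatMap (fun s => pvSuccL ts s "$")) := by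
        intro x hx
        exact (PySem.Set.mem_update _ _ x).2 (Or.inr hx)
      by_cases hstop' : ∀ x ∈ (PySem.Set.update (P ++ E ++ R)
            (E.flatMap (fun s => pvSuccL ts s "$"))).flatMap (fun s => pvSuccL ts s "$"),
          x ∈ PySem.Set.update (P ++ E ++ R) (E.flatMap (fun s => pvSuccL ts s "$"))
      · -- the augmented set is a fixpoint: the unaugmented loop reaches it in one round and stops
        have hflatsub : ∀ x ∈ (P ++ E ++ R).flatMap (fun s => pvSuccL ts s "$"),
            x ∈ PySem.Set.update (P ++ E ++ R) (E.flatMap (fun s => pvSuccL ts s "$")) := by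
          intro x hx
          rw [List.mem_flatMap] at hx
          obtain ⟨s, hs, hxs⟩ := hx
          exact hstop' x (List.mem_flatMap.2 ⟨s, hC'mem s hs, hxs⟩)
        have hRsub : ∀ x ∈ R.flatMap (fun s => pvSuccL ts s "$"),
            x ∈ PySem.Set.update (P ++ E ++ R) (E.flatMap (fun s => pvSuccL ts s "$")) := by
          intro x hx
          rw [List.mem_flatMap] at hx
          obtain ⟨s, hs, hxs⟩ := hx
          exact hflatsub x (List.mem_flatMap.2 ⟨s, hmemR s hs, hxs⟩)
        rw [hCeq, hC2, pv_update_subset_eq _ _ hRsub, pv_eps_step ts _, if_pos hstop']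
      · -- neither side stops: one more round each and the measure drops
        have hstep' : pvEpsLoop ts (PySem.Set.update (P ++ E ++ R)
              (E.flatMap (fun s => pvSuccL ts s "$")))
            = pvEpsLoop ts (PySem.Set.update
                (PySem.Set.update (P ++ E ++ R) (E.flatMap (fun s => pvSuccL ts s "$")))
                ((PySem.Set.update (P ++ E ++ R)
                  (E.flatMap (fun s => pvSuccL ts s "$"))).flatMap (fun s => pvSuccL ts s "$"))) := by
          rw [pv_eps_step ts _, if_neg hstop']
        -- C' = C ++ e'
        have hC'list : PySem.Set.update (P ++ E ++ R) (E.flatMap (fun s => pvSuccL ts s "$"))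
            = (P ++ E ++ R) ++ (PySem.Set.ofList (E.flatMap (fun s => pvSuccL ts s "$"))).filter
                (fun y => !(P ++ E ++ R).contains y) :=
          PySem.Set.update_eq_append_filter _ _
        -- C2 = C' ++ r'
        have hC2list : PySem.Set.update (PySem.Set.update (P ++ E ++ R)
              (E.flatMap (fun s => pvSuccL ts s "$"))) (R.flatMap (fun s => pvSuccL ts s "$"))
            = PySem.Set.update (P ++ E ++ R) (E.flatMap (fun s => pvSuccL ts s "$"))
              ++ (PySem.Set.ofList (R.flatMap (fun s => pvSuccL ts s "$"))).filter
                  (fun y => !(PySem.Set.update (P ++ E ++ R)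
                    (E.flatMap (fun s => pvSuccL ts s "$"))).contains y) :=
          PySem.Set.update_eq_append_filter _ _
        have habs : PySem.Set.update
              (PySem.Set.update (P ++ E ++ R) (E.flatMap (fun s => pvSuccL ts s "$")))
              ((PySem.Set.update (P ++ E ++ R)
                (E.flatMap (fun s => pvSuccL ts s "$"))).flatMap (fun s => pvSuccL ts s "$"))
            = PySem.Set.update (PySem.Set.update (PySem.Set.update (P ++ E ++ R)
                  (E.flatMap (fun s => pvSuccL ts s "$")))
                  (R.flatMap (fun s => pvSuccL ts s "$")))
                (((PySem.Set.ofList (E.flatMap (fun s => pvSuccL ts s "$"))).filter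
                  (fun y => !(P ++ E ++ R).contains y)).flatMap (fun s => pvSuccL ts s "$")) := by
          conv_lhs => rw [hC'list]
          rw [List.flatMap_append, ← hC'list, PySem.Set.update_append, hflatC,
            PySem.Set.update_append, PySem.Set.update_append,
            pv_update_subset_eq _ _ (fun x hx => hC'mem x (hPsub x hx)),
            pv_update_subset_eq _ _ hEin]
        rw [hCeq, hC2, hstep', habs, hC2list, hC'list]
        -- the measured universe shrinks strictly: some one-step successor was missing from C
        have hx : ∃ x ∈ (P ++ E ++ R).flatMap (fun s => pvSuccL ts s "$"), x ∉ P ++ E ++ R := by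
          by_contra hall
          push_neg at hall
          exact hstop hall
        obtain ⟨x, hxflat, hxnot⟩ := hx
        have hceq2 : PySem.Set.update (P ++ E ++ R)
              ((P ++ E ++ R).flatMap (fun s => pvSuccL ts s "$"))
            = ((P ++ E ++ R) ++ (PySem.Set.ofList (E.flatMap (fun s => pvSuccL ts s "$"))).filter
                  (fun y => !(P ++ E ++ R).contains y))
              ++ (PySem.Set.ofList (R.flatMap (fun s => pvSuccL ts s "$"))).filter
                  (fun y => !((P ++ E ++ R) ++ (PySem.Set.ofList
                    (E.flatMap (fun s => pvSuccL ts s "$"))).filter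
                      (fun y => !(P ++ E ++ R).contains y)).contains y) := by
          rw [hC2, hC2list, hC'list]
          rfl
        have hxT : x ∈ pvTargets ts := by
          rw [List.mem_flatMap] at hxflat
          obtain ⟨s, _, hxs⟩ := hxflat
          exact pv_succL_subset_targets ts s "$" x hxs
        have hxin : x ∈ ((P ++ E ++ R) ++ (PySem.Set.ofList
              (E.flatMap (fun s => pvSuccL ts s "$"))).filter
                (fun y => !(P ++ E ++ R).contains y))
            ++ (PySem.Set.ofList (R.flatMap (fun s => pvSuccL ts s "$"))).filter
                (fun y => !((P ++ E ++ R) ++ (PySem.Set.ofList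
                  (E.flatMap (fun s => pvSuccL ts s "$"))).filter
                    (fun y => !(P ++ E ++ R).contains y)).contains y) := by
          rw [← hceq2]
          exact (PySem.Set.mem_update _ _ x).2 (Or.inr hxflat)
        have hCsub : ∀ y ∈ P ++ E ++ R, y ∈ ((P ++ E ++ R) ++ (PySem.Set.ofList
              (E.flatMap (fun s => pvSuccL ts s "$"))).filter
                (fun y => !(P ++ E ++ R).contains y))
            ++ (PySem.Set.ofList (R.flatMap (fun s => pvSuccL ts s "$"))).filter
                (fun y => !((P ++ E ++ R) ++ (PySem.Set.ofList
                  (E.flatMap (fun s => pvSuccL ts s "$"))).filter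
                    (fun y => !(P ++ E ++ R).contains y)).contains y) := by
          intro y hy
          rw [← hceq2]
          exact (PySem.Set.mem_update _ _ y).2 (Or.inl hy)
        have hlt := pv_filter_notmem_lt (pvTargets ts) (P ++ E ++ R) _ hCsub x hxT hxnot hxin
        have hnd2 : (((P ++ E ++ R) ++ (PySem.Set.ofList
              (E.flatMap (fun s => pvSuccL ts s "$"))).filter
                (fun y => !(P ++ E ++ R).contains y))
            ++ (PySem.Set.ofList (R.flatMap (fun s => pvSuccL ts s "$"))).filter
                (fun y => !((P ++ E ++ R) ++ (PySem.Set.ofList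
                  (E.flatMap (fun s => pvSuccL ts s "$"))).filter
                    (fun y => !(P ++ E ++ R).contains y)).contains y)).Nodup := by
          rw [← hceq2]
          exact PySem.Set.nodup_update _ _ hnd
        have hP2 : ∀ s ∈ P ++ E ++ R, ∀ x ∈ pvSuccL ts s "$",
            x ∈ ((P ++ E ++ R) ++ (PySem.Set.ofList
              (E.flatMap (fun s => pvSuccL ts s "$"))).filter
                (fun y => !(P ++ E ++ R).contains y))
            ++ (PySem.Set.ofList (R.flatMap (fun s => pvSuccL ts s "$"))).filter
                (fun y => !((P ++ E ++ R) ++ (PySem.Set.ofList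
                  (E.flatMap (fun s => pvSuccL ts s "$"))).filter
                    (fun y => !(P ++ E ++ R).contains y)).contains y) := by
          intro s hs z hz
          rw [← hceq2]
          exact (PySem.Set.mem_update _ _ z).2 (Or.inr (List.mem_flatMap.2 ⟨s, hs, hz⟩))
        exact ih _ (lt_of_lt_of_le hlt hN) (P ++ E ++ R) _ _ (le_refl _) hnd2 hP2

lemma pv_bfs_eq_eps (ts : List (String × String × String)) :
    ∀ (N : Nat) (res : PySem.Set String) (i : Nat),
      ((pvTargets ts).filter (fun t => !decide (t ∈ res))).length + (res.length - i) ≤ N →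
      res.Nodup → i ≤ res.length →
      (∀ s ∈ res.take i, ∀ x ∈ pvSuccL ts s "$", x ∈ res) →
      pvBfs ts res i = pvEpsLoop ts res := by
  intro N
  induction N using Nat.strong_induction_on with
  | _ N ih =>
    intro res i hN hnd hi hcl
    rw [pvBfs]
    by_cases h : i < res.length
    · rw [dif_pos h]
      have hLsub : ∀ x ∈ pvLook ts (res[i], "$"), x ∈ pvTargets ts := by
        rw [pv_look_eq]
        exact fun x hx => pv_succL_subset_targets _ _ _ x hx
      have hg := pv_update_growth (pvTargets ts) (pvLook ts (res[i], "$")) res hLsub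
      have hlen := pv_le_length_update (pvLook ts (res[i], "$")) res
      have hres1 : PySem.Set.update res (pvLook ts (res[i], "$"))
          = res ++ (PySem.Set.ofList (pvLook ts (res[i], "$"))).filter
              (fun y => !res.contains y) := PySem.Set.update_eq_append_filter _ _
      have htake : (PySem.Set.update res (pvLook ts (res[i], "$"))).take (i + 1)
          = res.take (i + 1) := by
        rw [hres1]
        exact List.take_append_of_le_length h
      have hcl1 : ∀ s ∈ (PySem.Set.update res (pvLook ts (res[i], "$"))).take (i + 1),
          ∀ x ∈ pvSuccL ts s "$", x ∈ PySem.Set.update res (pvLook ts (res[i], "$")) := by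
        rw [htake, List.take_succ]
        intro s hs x hx
        rw [List.mem_append] at hs
        rcases hs with hs | hs
        · exact (PySem.Set.mem_update _ _ x).2 (Or.inl (hcl s hs x hx))
        · have hsi : s = res[i] := by
            simp [List.getElem?_eq_getElem h] at hs
            exact hs
          subst hsi
          refine (PySem.Set.mem_update _ _ x).2 (Or.inr ?_)
          rw [pv_look_eq]
          exact hx
      have hbfs := ih (((pvTargets ts).filter
            (fun t => !decide (t ∈ PySem.Set.update res (pvLook ts (res[i], "$"))))).length
            + ((PySem.Set.update res (pvLook ts (res[i], "$"))).length - (i + 1)))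
        (by omega)
        (PySem.Set.update res (pvLook ts (res[i], "$"))) (i + 1) (le_refl _)
        (PySem.Set.nodup_update _ _ hnd) (by omega) hcl1
      rw [hbfs]
      -- absorbing the successors of position i does not change A's fixpoint loop
      have hd : res.take i ++ [res[i]] ++ res.drop (i + 1) = res := by
        conv_rhs => rw [← List.take_append_drop i res, List.drop_eq_getElem_cons h]
        simp
      have hcl' : ∀ s ∈ res.take i, ∀ x ∈ pvSuccL ts s "$",
          x ∈ res.take i ++ [res[i]] ++ res.drop (i + 1) := by
        rw [hd]
        exact hcl
      have habs := pv_eps_absorb ts (((pvTargets ts).filter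
          (fun t => !decide (t ∈ res.take i ++ [res[i]] ++ res.drop (i + 1)))).length)
        (res.take i) [res[i]] (res.drop (i + 1)) (le_refl _) (by rw [hd]; exact hnd) hcl'
      rw [hd] at habs
      simp only [List.flatMap_cons, List.flatMap_nil, List.append_nil] at habs
      rw [pv_look_eq]
      exact habs
    · rw [dif_neg h]
      have hieq : res.take i = res := List.take_of_length_le (by omega)
      have hallcl : ∀ x ∈ res.flatMap (fun s => pvSuccL ts s "$"), x ∈ res := by
        intro x hx
        rw [List.mem_flatMap] at hx
        obtain ⟨s, hs, hxs⟩ := hx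
        exact hcl s (by rw [hieq]; exact hs) x hxs
      rw [pv_eps_step, if_pos hallcl]

-- ===== VERDICT (by name: the statement is the Claim_ definition above) =====
theorem getNextStates_spec : Claim_equal_getNextStates := by
  intro cs sym ts _ hpre
  have hnd : cs.Nodup := hpre
  show getNextStates cs sym ts = getNextStates_alt cs sym ts
  dsimp only [getNextStates, getNextStates_alt, getEpsilonTransitions]
  have hold : PySem.Set.union PySem.Set.empty cs = PySem.Set.ofList cs := rfl
  have hcseq : PySem.Set.ofList cs = cs := PySem.Set.ofList_eq_self_of_nodup cs hnd
  have hrem : (PySem.Set.ofList cs).foldl (fun l s => (PySem.List.remove? l s).getD l)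
        (cs ++ pvNewA ts sym cs)
      = pvNewA ts sym cs := by
    rw [hcseq, pv_remove_fold cs cs _ hnd (fun v hv => hv)]
    have h0 : List.foldl List.erase cs cs = [] := by
      simpa using pv_foldl_erase_nodup cs [] hnd
    rw [h0, List.nil_append]
  rw [hold, hrem]
  have hseedA : PySem.Set.ofList (pvNewA ts sym cs)
      = PySem.Set.update PySem.Set.empty (cs.flatMap (fun s => pvSuccL ts s sym)) := by
    rw [pv_newA_eq, PySem.Set.ofList_ofList]
    rfl
  have hseedB : cs.foldl (fun acc s => PySem.Set.update acc (pvLook ts (s, sym))) PySem.Set.empty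
      = PySem.Set.update PySem.Set.empty (cs.flatMap (fun s => pvSuccL ts s sym)) := by
    rw [pv_foldl_update_eq]
    simp only [pv_look_eq]
  rw [hseedA, hseedB]
  exact (pv_bfs_eq_eps ts
    (((pvTargets ts).filter (fun t => !decide (t ∈ PySem.Set.update PySem.Set.empty
        (cs.flatMap (fun s => pvSuccL ts s sym))))).length
      + (PySem.Set.update PySem.Set.empty (cs.flatMap (fun s => pvSuccL ts s sym))).length)
    (PySem.Set.update PySem.Set.empty (cs.flatMap (fun s => pvSuccL ts s sym))) 0
    (by omega)
    (PySem.Set.nodup_update _ _ List.nodup_nil)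
    (Nat.zero_le _)
    (by intro s hs; simp at hs)).symm
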